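-- pv_equiv track=rewrite | github.com/SonderLor/kispython | Practice1/task4.py | f
-- ===== SOURCE A (Python) =====
-- def f(b: int, n: int, a: int) -> int:
--     first = 0
--     for j in range(1, n + 1):
--         for c in range(1, b + 1):
--             first += ((34 * j + 41) ** 4) - 93 * (c + 79 + c ** 3) ** 5
--     second = 1
--     for k in range(1, a + 1):
--         second_sum = 0
--         for c in range(1, b + 1):
--             second_sum += 22 * (c - 8) ** 5 - k ** 4
--         second *= second_sum
--     return first - second
-- ===== SOURCE B (Python) =====
-- def f(b: int, n: int, a: int) -> int:
--     # Precompute the c-loop sums once instead of re-running them for every j and k.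
--     cs = range(1, b + 1)
--     cnt = len(cs)
--     s1 = sum(93 * (c + 79 + c ** 3) ** 5 for c in cs)
--     s2 = sum(22 * (c - 8) ** 5 for c in cs)
--     first = sum(cnt * (34 * j + 41) ** 4 - s1 for j in range(1, n + 1))
--     second = 1
--     for k in range(1, a + 1):
--         second *= s2 - cnt * k ** 4
--     return first - second
-- ===== Notes on version B (the rewrite author's own statement) =====
-- stated objective: faster
-- what changed: The inner c-loop is hoisted out: the two c-sums are computed once and reused, so the j-loop and k-loop each do O(1) work per iteration instead of an O(b) inner scan.
import Mathlib
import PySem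

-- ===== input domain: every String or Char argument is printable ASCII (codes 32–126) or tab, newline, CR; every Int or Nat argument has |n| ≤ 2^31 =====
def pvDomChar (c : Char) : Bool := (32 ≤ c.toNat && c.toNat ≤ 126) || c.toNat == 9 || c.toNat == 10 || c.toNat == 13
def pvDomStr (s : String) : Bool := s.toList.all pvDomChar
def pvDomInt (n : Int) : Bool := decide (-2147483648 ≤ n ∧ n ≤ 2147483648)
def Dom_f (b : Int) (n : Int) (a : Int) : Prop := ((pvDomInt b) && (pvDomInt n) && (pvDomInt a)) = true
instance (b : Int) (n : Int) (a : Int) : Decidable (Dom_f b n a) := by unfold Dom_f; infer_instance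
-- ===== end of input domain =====

-- ===== PORT A =====
-- Literal port of A: nested loops, inner c-loop re-run for every j and every k.
def f (b : Int) (n : Int) (a : Int) : Int :=
  let first : Int :=
    (PySem.List.pyRange 1 (n + 1) 1).foldl (fun first j =>
      (PySem.List.pyRange 1 (b + 1) 1).foldl (fun first c =>
        first + ((34 * j + 41) ^ 4 - 93 * (c + 79 + c ^ 3) ^ 5)) first) 0
  let second : Int :=
    (PySem.List.pyRange 1 (a + 1) 1).foldl (fun second k =>
      second * ((PySem.List.pyRange 1 (b + 1) 1).foldl (fun s c =>
        s + (22 * (c - 8) ^ 5 - k ^ 4)) 0)) 1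
  first - second

-- ===== PORT B =====
-- B hoists the c-loop: the two c-sums are computed once; j-loop and k-loop use them.
def f_alt (b : Int) (n : Int) (a : Int) : Int :=
  let cs := PySem.List.pyRange 1 (b + 1) 1
  let cnt : Int := PySem.List.len cs
  let s1 : Int := (cs.map (fun c => 93 * (c + 79 + c ^ 3) ^ 5)).sum
  let s2 : Int := (cs.map (fun c => 22 * (c - 8) ^ 5)).sum
  let first : Int :=
    ((PySem.List.pyRange 1 (n + 1) 1).map (fun j => cnt * (34 * j + 41) ^ 4 - s1)).sum
  let second : Int :=
    (PySem.List.pyRange 1 (a + 1) 1).foldl (fun second k => second * (s2 - cnt * k ^ 4)) 1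
  first - second

-- ===== PRECONDITION & SPEC =====
def Spec_f (b : Int) (n : Int) (a : Int) (out : Int) : Prop := out = f_alt b n a
instance (b : Int) (n : Int) (a : Int) (out : Int) : Decidable (Spec_f b n a out) := by unfold Spec_f; infer_instance

-- ===== CLAIM =====
def Claim_equal_f : Prop := ∀ (b : Int) (n : Int) (a : Int), Dom_f b n a → Spec_f b n a (f b n a)

-- ===== LEMMAS AND PROOFS =====

-- A fold that only adds can be taken from init 0 and shifted.
theorem foldl_add_term_shift (t : Int → Int) :
    ∀ (cs : List Int) (init : Int),
      cs.foldl (fun s c => s + t c) init = init + (cs.map t).sum := by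
  intro cs
  induction cs with
  | nil => intro init; simp
  | cons c cs ih => intro init; simp [List.foldl, ih]; ring

-- Sum of (X - g c) over cs = |cs|·X − Σ g c.
theorem sum_const_sub (X : Int) (g : Int → Int) :
    ∀ (cs : List Int),
      (cs.map (fun c => X - g c)).sum = cs.length * X - (cs.map g).sum := by
  intro cs
  induction cs with
  | nil => simp
  | cons c cs ih => simp [ih]; ring

theorem inner_first (b X init : Int) :
    (PySem.List.pyRange 1 (b + 1) 1).foldl
        (fun s c => s + (X - 93 * (c + 79 + c ^ 3) ^ 5)) init
      = init + ((PySem.List.pyRange 1 (b + 1) 1).length : Int) * X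
          - ((PySem.List.pyRange 1 (b + 1) 1).map (fun c => 93 * (c + 79 + c ^ 3) ^ 5)).sum := by
  rw [foldl_add_term_shift, sum_const_sub]
  ring

theorem inner_second (b k : Int) :
    (PySem.List.pyRange 1 (b + 1) 1).foldl
        (fun s c => s + (22 * (c - 8) ^ 5 - k ^ 4)) 0
      = ((PySem.List.pyRange 1 (b + 1) 1).map (fun c => 22 * (c - 8) ^ 5)).sum
          - ((PySem.List.pyRange 1 (b + 1) 1).length : Int) * k ^ 4 := by
  rw [foldl_add_term_shift]
  induction (PySem.List.pyRange 1 (b + 1) 1) with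
  | nil => simp
  | cons c cs ih => simp at ih ⊢; rw [ih]; ring

-- ===== VERDICT =====
theorem f_spec : Claim_equal_f := by
  unfold Claim_equal_f Spec_f f f_alt
  intro b n a _
  simp only [PySem.List.len_eq]
  congr 1
  · -- first parts
    have h : ∀ init : Int,
        (PySem.List.pyRange 1 (n + 1) 1).foldl (fun first j =>
          (PySem.List.pyRange 1 (b + 1) 1).foldl (fun first c =>
            first + ((34 * j + 41) ^ 4 - 93 * (c + 79 + c ^ 3) ^ 5)) first) init
        = init + ((PySem.List.pyRange 1 (n + 1) 1).map (fun j =>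
            ((PySem.List.pyRange 1 (b + 1) 1).length : Int) * (34 * j + 41) ^ 4
              - ((PySem.List.pyRange 1 (b + 1) 1).map (fun c => 93 * (c + 79 + c ^ 3) ^ 5)).sum)).sum := by
      induction (PySem.List.pyRange 1 (n + 1) 1) with
      | nil => intro init; simp
      | cons j js ih =>
          intro init
          simp only [List.foldl, List.map, List.sum_cons]
          rw [ih, inner_first]
          ring
    rw [h 0]; ring
  · -- second parts: the step functions agree pointwise by inner_second
    have hstep : (fun (second k : Int) =>
          second * ((PySem.List.pyRange 1 (b + 1) 1).foldl
            (fun s c => s + (22 * (c - 8) ^ 5 - k ^ 4)) 0))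
        = (fun (second k : Int) =>
          second * (((PySem.List.pyRange 1 (b + 1) 1).map (fun c => 22 * (c - 8) ^ 5)).sum
            - ((PySem.List.pyRange 1 (b + 1) 1).length : Int) * k ^ 4)) := by
      funext s k; rw [inner_second]
    rw [hstep]
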